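-- pv_equiv track=rewrite | github.com/alfgold/trojan-c2 | esoteric_ai.py | get_favorable_periods
-- ===== SOURCE A (Python) =====
-- from typing import Dict, List, Tuple, Optional
--
-- def get_favorable_periods(year_number: int) -> List[str]:
--     """Благоприятные периоды"""
--     months = ["Январь", "Февраль", "Март", "Апрель", "Май", "Июнь",
--              "Июль", "Август", "Сентябрь", "Октябрь", "Ноябрь", "Декабрь"]
--
--     # Упрощенный расчет благоприятных периодов
--     favorable = []
--     for i, month in enumerate(months, 1):
--         if (i + year_number) % 3 == 0:  # Каждые 3 месяца
--             favorable.append(month)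
--
--     return favorable[:4]  # Возвращаем до 4 благоприятных месяцев
-- ===== SOURCE B (Python) =====
-- from typing import List
--
-- def get_favorable_periods(year_number: int) -> List[str]:
--     """Благоприятные периоды"""
--     months = ["Январь", "Февраль", "Март", "Апрель", "Май", "Июнь",
--              "Июль", "Август", "Сентябрь", "Октябрь", "Ноябрь", "Декабрь"]
--     start = (-(1 + year_number)) % 3
--     return months[start::3]
-- ===== Notes on version B (the rewrite author's own statement) =====
-- stated objective: simpler
-- what changed: Replaces the enumerate-filter loop plus [:4] truncation with a closed-form start offset (-(1+year))%3 and a single stride-3 slice months[start::3].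
import Mathlib
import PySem

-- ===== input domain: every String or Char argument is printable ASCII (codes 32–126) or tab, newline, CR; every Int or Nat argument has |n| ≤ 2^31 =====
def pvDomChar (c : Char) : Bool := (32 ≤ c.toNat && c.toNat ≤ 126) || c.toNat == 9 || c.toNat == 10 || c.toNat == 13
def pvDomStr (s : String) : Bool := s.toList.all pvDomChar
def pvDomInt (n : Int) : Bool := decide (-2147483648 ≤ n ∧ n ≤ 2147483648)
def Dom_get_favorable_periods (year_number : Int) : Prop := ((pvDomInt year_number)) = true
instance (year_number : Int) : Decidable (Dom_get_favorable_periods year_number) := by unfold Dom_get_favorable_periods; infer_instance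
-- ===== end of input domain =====

-- B replaces A's per-month loop + truncation with a closed-form start offset and a stride-3 slice (objective: simpler).

-- ===== PORT A =====
-- months list literal shared by the loop, as in A
def pvMonths : List String :=
  ["Январь", "Февраль", "Март", "Апрель", "Май", "Июнь",
   "Июль", "Август", "Сентябрь", "Октябрь", "Ноябрь", "Декабрь"]

def get_favorable_periods (year_number : Int) : List String :=
  let favorable :=
    (PySem.List.enumerate pvMonths 1).foldl
      (fun acc p => if PySem.Int.mod (p.1 + year_number) 3 == 0 then acc ++ [p.2] else acc) []
  PySem.List.slice favorable none (some 4)   -- favorable[:4]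

-- ===== PORT B =====
def get_favorable_periods_alt (year_number : Int) : List String :=
  let start := PySem.Int.mod (-(1 + year_number)) 3
  -- months[start::3]: step 3 ≠ 0, so slice? is some
  (PySem.List.slice? pvMonths (some start) none 3).getD []

-- ===== PRECONDITION & SPEC =====
def Spec_get_favorable_periods (year_number : Int) (out : List String) : Prop := out = get_favorable_periods_alt year_number
instance (year_number : Int) (out : List String) : Decidable (Spec_get_favorable_periods year_number out) := by unfold Spec_get_favorable_periods; infer_instance

-- ===== CLAIM (what is proved, stated in full; the proofs are below) =====
def Claim_equal_get_favorable_periods : Prop := ∀ (year_number : Int), Dom_get_favorable_periods year_number → Spec_get_favorable_periods year_number (get_favorable_periods year_number)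

-- ===== LEMMAS AND PROOFS =====

lemma pv_dvd (a k r : Int) : (3 ∣ a + (3 * k + r)) ↔ (3 ∣ (a + r)) := by omega

-- ===== VERDICT (by name: the statement is the Claim_ definition above) =====
theorem get_favorable_periods_spec : Claim_equal_get_favorable_periods := by
  intro y _
  unfold Spec_get_favorable_periods
  obtain ⟨k, r, hy, hr⟩ : ∃ k r, y = 3 * k + r ∧ (r = 0 ∨ r = 1 ∨ r = 2) := ⟨y / 3, y % 3, by omega, by omega⟩
  subst hy
  rcases hr with h | h | h <;> subst h <;>
    simp [get_favorable_periods, get_favorable_periods_alt, pvMonths,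
      PySem.List.enumerate, pv_dvd]
  · rw [show ((-(3 * k) + -1) % 3 : Int) = 2 from by omega]; decide
  · rw [show ((-1 + -(3 * k) + -1) % 3 : Int) = 1 from by omega]; decide
  · rw [show ((-2 + -(3 * k) + -1) % 3 : Int) = 0 from by omega]; decide
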